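-- pv_equiv track=rewrite | github.com/levipshemish/jewgo-app | backend/routes/api_v4.py | _collect_sets_from_restaurants
-- ===== SOURCE A (Python) =====
-- def _collect_sets_from_restaurants(restaurants):
--     agencies = {
--         r.get("certifying_agency") for r in restaurants if r.get("certifying_agency")
--     }
--     kosher_categories = {
--         r.get("kosher_category") for r in restaurants if r.get("kosher_category")
--     }
--     listing_types = {
--         r.get("listing_type") for r in restaurants if r.get("listing_type")
--     }
--     price_ranges = {r.get("price_range") for r in restaurants if r.get("price_range")}
--     cities = {r.get("city") for r in restaurants if r.get("city")}
--     states = {r.get("state") for r in restaurants if r.get("state")}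
--     return agencies, kosher_categories, listing_types, price_ranges, cities, states
-- ===== SOURCE B (Python) =====
-- def _collect_sets_from_restaurants(restaurants):
--     fields = ("certifying_agency", "kosher_category", "listing_type", "price_range", "city", "state")
--     collected = {f: set() for f in fields}
--     for r in restaurants:
--         for key, value in r.items():
--             if value and key in collected:
--                 collected[key].add(value)
--     return tuple(collected[f] for f in fields)
-- ===== Notes on version B (the rewrite author's own statement) =====
-- stated objective: alternative
-- what changed: Inverts the traversal: instead of six per-field set-comprehensions doing keyed .get lookups, B scans each record's (key, value) items once and dispatches values by key into a dict of six sets, never performing a field lookup on a record.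
import Mathlib
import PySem

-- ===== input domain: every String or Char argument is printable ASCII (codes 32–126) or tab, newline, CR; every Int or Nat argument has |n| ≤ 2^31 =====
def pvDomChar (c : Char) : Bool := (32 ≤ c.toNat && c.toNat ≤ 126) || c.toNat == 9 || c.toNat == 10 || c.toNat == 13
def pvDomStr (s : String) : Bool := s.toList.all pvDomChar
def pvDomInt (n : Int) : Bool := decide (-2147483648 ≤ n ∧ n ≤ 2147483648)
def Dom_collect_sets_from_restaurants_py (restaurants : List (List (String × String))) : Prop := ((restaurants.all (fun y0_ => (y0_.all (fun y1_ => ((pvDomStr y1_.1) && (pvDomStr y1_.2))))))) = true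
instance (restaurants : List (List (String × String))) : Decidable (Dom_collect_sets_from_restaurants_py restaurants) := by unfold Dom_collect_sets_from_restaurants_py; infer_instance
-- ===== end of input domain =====

-- B inverts the traversal: instead of six set-comprehensions with keyed lookups, it scans each record's items once and dispatches values by key into a dict of six sets (alternative decomposition, same results).


-- ===== PORT A =====
-- r.get(k) when the value is truthy (a non-empty string), else none
def pvGetTruthy (r : List (String × String)) (k : String) : Option String :=
  match (PySem.Dict.mk r).get? k with
  | some s => if s = "" then none else some s
  | none => none

-- {r.get(k) for r in restaurants if r.get(k)}
def pvFieldSet (restaurants : List (List (String × String))) (k : String) : PySem.Set String :=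
  PySem.Set.ofList (restaurants.filterMap (fun r => pvGetTruthy r k))

def collect_sets_from_restaurants_py (restaurants : List (List (String × String))) : List String × List String × List String × List String × List String × List String :=
  (pvFieldSet restaurants "certifying_agency",
   pvFieldSet restaurants "kosher_category",
   pvFieldSet restaurants "listing_type",
   pvFieldSet restaurants "price_range",
   pvFieldSet restaurants "city",
   pvFieldSet restaurants "state")

-- ===== PORT B =====
-- the items of the dict represented by the association list r (first occurrence of each key wins,
-- matching the convention that lookup is first-match); exact port of r.items()
def pvItems : List (String × String) → List (String × String)
  | [] => []
  | (k, v) :: rest => (k, v) :: pvItems (rest.filter (fun p => p.1 != k))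
termination_by l => l.length
decreasing_by
  simp only [List.length_unattach]
  exact Nat.lt_succ_of_le (le_trans (List.length_filter_le _ _) (Nat.le_of_eq (List.length_attach ..)))

def pvFields : List String :=
  ["certifying_agency", "kosher_category", "listing_type", "price_range", "city", "state"]

-- collected = {f: set() for f in fields}
def pvInit : PySem.Dict String (PySem.Set String) :=
  pvFields.foldl (fun d f => d.insert f PySem.Set.empty) PySem.Dict.empty

-- if value and key in collected: collected[key].add(value)
def pvStepB (d : PySem.Dict String (PySem.Set String)) (p : String × String) :
    PySem.Dict String (PySem.Set String) :=
  if (p.2 != "") && d.contains p.1 then d.modify p.1 PySem.Set.empty (fun s => PySem.Set.add s p.2)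
  else d

def collect_sets_from_restaurants_py_alt (restaurants : List (List (String × String))) : List String × List String × List String × List String × List String × List String :=
  let c := restaurants.foldl (fun d r => (pvItems r).foldl pvStepB d) pvInit
  -- tuple(collected[f] for f in fields); every field key is present, so collected[f] = getD f ∅ exactly
  (c.getD "certifying_agency" PySem.Set.empty,
   c.getD "kosher_category" PySem.Set.empty,
   c.getD "listing_type" PySem.Set.empty,
   c.getD "price_range" PySem.Set.empty,
   c.getD "city" PySem.Set.empty,
   c.getD "state" PySem.Set.empty)

-- ===== PRECONDITION & SPEC =====
def Spec_collect_sets_from_restaurants_py (restaurants : List (List (String × String))) (out : List String × List String × List String × List String × List String × List String) : Prop := out = collect_sets_from_restaurants_py_alt restaurants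
instance (restaurants : List (List (String × String))) (out : List String × List String × List String × List String × List String × List String) : Decidable (Spec_collect_sets_from_restaurants_py restaurants out) := by unfold Spec_collect_sets_from_restaurants_py; infer_instance

-- ===== CLAIM (what is proved, stated in full; the proofs are below) =====
def Claim_equal_collect_sets_from_restaurants_py : Prop := ∀ (restaurants : List (List (String × String))), Dom_collect_sets_from_restaurants_py restaurants → Spec_collect_sets_from_restaurants_py restaurants (collect_sets_from_restaurants_py restaurants)

-- ===== LEMMAS AND PROOFS =====
-- pvItems only keeps pairs of the original list
theorem pvItems_subset : ∀ (l : List (String × String)) (p : String × String), p ∈ pvItems l → p ∈ l := by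
  intro l
  induction l using pvItems.induct with
  | case1 => intro p h; simp [pvItems] at h
  | case2 k v rest ih =>
    simp only [List.unattach_filter, List.unattach_attach] at ih
    intro p h
    rw [pvItems] at h
    rcases List.mem_cons.mp h with h | h
    · simp [h]
    · exact List.mem_cons_of_mem _ (List.mem_of_mem_filter (ih p h))

-- the keys of pvItems are distinct
theorem pvItems_nodup : ∀ (l : List (String × String)), ((pvItems l).map Prod.fst).Nodup := by
  intro l
  induction l using pvItems.induct with
  | case1 => simp [pvItems]
  | case2 k v rest ih =>
    simp only [List.unattach_filter, List.unattach_attach] at ih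
    rw [pvItems]
    simp only [List.map_cons, List.nodup_cons]
    refine ⟨?_, ih⟩
    intro hk
    rcases List.mem_map.mp hk with ⟨p, hp, hpk⟩
    have := List.of_mem_filter (pvItems_subset _ p hp)
    simp [hpk] at this

-- filtering out key k does not change lookups at x ≠ k
theorem get?_filter_ne (k x : String) (hx : x ≠ k) : ∀ (l : List (String × String)),
    (PySem.Dict.mk (l.filter (fun p => p.1 != k))).get? x = (PySem.Dict.mk l).get? x := by
  intro l
  induction l with
  | nil => rfl
  | cons p rest ih =>
    obtain ⟨a, b⟩ := p
    by_cases hak : a = k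
    · subst hak
      have hb : ((a, b).1 != a) = false := by simp
      rw [List.filter_cons, hb]
      simp only [Bool.false_eq_true, if_false]
      rw [ih, PySem.Dict.get?_mk_cons]
      have : (a == x) = false := by simp; exact fun h => hx h.symm
      simp [this]
    · have hb : ((a, b).1 != k) = true := by simp [hak]
      rw [List.filter_cons, hb]
      simp only [if_true]
      rw [PySem.Dict.get?_mk_cons, PySem.Dict.get?_mk_cons, ih]

-- first-match lookup is unchanged by the items dedup
theorem get?_pvItems (x : String) : ∀ (l : List (String × String)),
    (PySem.Dict.mk (pvItems l)).get? x = (PySem.Dict.mk l).get? x := by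
  intro l
  induction l using pvItems.induct with
  | case1 => simp [pvItems]
  | case2 k v rest ih =>
    simp only [List.unattach_filter, List.unattach_attach] at ih
    rw [pvItems, PySem.Dict.get?_mk_cons, PySem.Dict.get?_mk_cons]
    by_cases hkx : k = x
    · simp [hkx]
    · have hb : (k == x) = false := by simp [hkx]
      rw [hb]
      simp only [Bool.false_eq_true, if_false]
      rw [ih, get?_filter_ne k x (fun h => hkx h.symm)]

theorem pvGetTruthy_pvItems (r : List (String × String)) (k : String) :
    pvGetTruthy (pvItems r) k = pvGetTruthy r k := by
  simp [pvGetTruthy, get?_pvItems]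

-- a missing key looks up to none
theorem get?_of_not_mem (f : String) : ∀ (ps : List (String × String)),
    f ∉ ps.map Prod.fst → (PySem.Dict.mk ps).get? f = none := by
  intro ps
  induction ps with
  | nil => intro _; rfl
  | cons p rest ih =>
    intro h
    obtain ⟨a, b⟩ := p
    simp only [List.map_cons, List.mem_cons, not_or] at h
    rw [PySem.Dict.get?_mk_cons]
    have : (a == f) = false := by simp; exact fun hh => h.1 hh.symm
    simp [this, ih h.2]

-- the inner loop never changes which keys exist
theorem contains_foldl_pvStepB (g : String) : ∀ (ps : List (String × String)) (d : PySem.Dict String (PySem.Set String)),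
    (ps.foldl pvStepB d).contains g = d.contains g := by
  intro ps
  induction ps with
  | nil => intro d; rfl
  | cons p rest ih =>
    intro d
    rw [List.foldl_cons, ih]
    unfold pvStepB
    split
    · next h =>
        rw [PySem.Dict.contains_modify]
        simp only [Bool.and_eq_true] at h
        by_cases hg : g = p.1
        · simp [hg, h.2]
        · simp [hg]
    · rfl

-- the inner loop adds exactly the truthy value at key f, if any
theorem getD_foldl_pvStepB (f : String) : ∀ (ps : List (String × String)) (d : PySem.Dict String (PySem.Set String)),
    (ps.map Prod.fst).Nodup → d.contains f = true →
    (ps.foldl pvStepB d).getD f PySem.Set.empty =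
      (match pvGetTruthy ps f with
       | some v => PySem.Set.add (d.getD f PySem.Set.empty) v
       | none => d.getD f PySem.Set.empty) := by
  intro ps
  induction ps with
  | nil => intro d _ _; rfl
  | cons p rest ih =>
    intro d hnd hc
    obtain ⟨k, v⟩ := p
    simp only [List.map_cons, List.nodup_cons] at hnd
    rw [List.foldl_cons]
    by_cases hkf : k = f
    · subst hkf
      -- the only pair at key k; the rest of the loop leaves getD k alone
      have hrest : pvGetTruthy rest k = none := by
        simp [pvGetTruthy, get?_of_not_mem k rest hnd.1]
      by_cases hv : v = ""
      · have hstep : pvStepB d (k, v) = d := by simp [pvStepB, hv]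
        rw [hstep, ih d hnd.2 hc, hrest]
        simp [pvGetTruthy, PySem.Dict.get?_mk_cons, hv]
      · have hstep : pvStepB d (k, v) = d.modify k PySem.Set.empty (fun s => PySem.Set.add s v) := by
          simp [pvStepB, hv, hc]
        have hc2 : (d.modify k PySem.Set.empty (fun s => PySem.Set.add s v)).contains k = true := by
          rw [PySem.Dict.contains_modify]; simp
        rw [hstep, ih _ hnd.2 hc2, hrest]
        simp [pvGetTruthy, PySem.Dict.get?_mk_cons, hv, PySem.Dict.getD_modify_self]
    · -- key ≠ f: step does not touch getD f, lookup skips the pair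
      have hget : pvGetTruthy ((k, v) :: rest) f = pvGetTruthy rest f := by
        have : (k == f) = false := by simp [hkf]
        simp [pvGetTruthy, PySem.Dict.get?_mk_cons, this]
      have hgd : (pvStepB d (k, v)).getD f PySem.Set.empty = d.getD f PySem.Set.empty := by
        unfold pvStepB
        split
        · apply PySem.Dict.getD_modify_of_ne
          exact Ne.symm hkf
        · rfl
      have hc2 : (pvStepB d (k, v)).contains f = true := by
        unfold pvStepB; split
        · rw [PySem.Dict.contains_modify]; simp [hc]
        · exact hc
      rw [ih _ hnd.2 hc2, hgd, hget]

-- the outer loop accumulates, at key f, exactly A's filterMapped truthy values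
theorem getD_outer (f : String) : ∀ (xs : List (List (String × String))) (d : PySem.Dict String (PySem.Set String)),
    d.contains f = true →
    (xs.foldl (fun d r => (pvItems r).foldl pvStepB d) d).getD f PySem.Set.empty =
      (xs.filterMap (fun r => pvGetTruthy r f)).foldl PySem.Set.add (d.getD f PySem.Set.empty) := by
  intro xs
  induction xs with
  | nil => intro d _; rfl
  | cons r xs ih =>
    intro d hc
    rw [List.foldl_cons, List.filterMap_cons]
    have hc2 : ((pvItems r).foldl pvStepB d).contains f = true := by
      rw [contains_foldl_pvStepB]; exact hc
    rw [ih _ hc2]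
    rw [getD_foldl_pvStepB f (pvItems r) d (pvItems_nodup r) hc, pvGetTruthy_pvItems]
    cases pvGetTruthy r f <;> rfl

-- ===== VERDICT (by name: the statement is the Claim_ definition above) =====
theorem collect_sets_from_restaurants_py_spec : Claim_equal_collect_sets_from_restaurants_py := by
  intro restaurants _
  show collect_sets_from_restaurants_py restaurants = collect_sets_from_restaurants_py_alt restaurants
  simp only [collect_sets_from_restaurants_py, collect_sets_from_restaurants_py_alt]
  have h : ∀ f : String, pvInit.contains f = true → pvInit.getD f PySem.Set.empty = PySem.Set.empty →
      pvFieldSet restaurants f =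
        (restaurants.foldl (fun d r => (pvItems r).foldl pvStepB d) pvInit).getD f PySem.Set.empty := by
    intro f hc hd
    rw [getD_outer f restaurants pvInit hc, hd, pvFieldSet, PySem.Set.ofList_eq_foldl]
    rfl
  refine Prod.ext ?_ (Prod.ext ?_ (Prod.ext ?_ (Prod.ext ?_ (Prod.ext ?_ ?_)))) <;>
    simp only <;> exact h _ (by decide) (by decide)
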